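-- pv_equiv track=rewrite | github.com/sunghun7511/Writeup | ctf/codegate/2018-Final/misc/Random Picross/test.py | generate_possible_rows
-- ===== SOURCE A (Python) =====
-- SYMBOL_X = 1
--
-- SYMBOL_FILLED = 2
--
-- def fixed_sum_digits(digits, Tot):
--     """
--     adapted from http://stackoverflow.com/a/8617750
--
--     Given digits and Tot, it generates an array of all ways to arrange "digits" x digits so that
--     the sum of them is "Tot". Zero can be a digit on either end, otherwise it must be one or greater
--     """
--     ways = []
--     def iter_fun(sum, deepness, sequence, Total):
--         if deepness == 0:
--             if sum == Total:
--                 ways.append(sequence)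
--         else:
--             on_end = deepness == 1 or deepness == digits
--             for i in range(0 if on_end else 1, Total - sum + 1):
--                 iter_fun(sum + i, deepness - 1, sequence + [i], Total)
--
--     iter_fun(0, digits, [], Tot)
--     return ways
--
-- def generate_possible_rows(nums, size):
--     digits = len(nums) + 1
--     space_left = size - sum(nums)
--     combos = fixed_sum_digits(digits, space_left)
--
--     rows = []
--     for combo in combos:
--         row = [None] * (len(combo) + len(nums))
--         row[::2] = combo
--         row[1::2] = nums
--         out = []
--         curr = SYMBOL_X;
--         for r in row:
--             out.extend([curr] * r)
--             curr = SYMBOL_X if (curr == SYMBOL_FILLED) else SYMBOL_FILLED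
--         rows.append(out)
--     return rows
-- ===== SOURCE B (Python) =====
-- SYMBOL_X = 1
--
-- SYMBOL_FILLED = 2
--
-- def _place(nums, n, space_left, k, used, row, rows):
--     if k == n:
--         gap = space_left - used
--         if gap >= 0:
--             rows.append(row + [SYMBOL_X] * gap)
--         return
--     lo = 0 if k == 0 else 1
--     for gap in range(lo, space_left - used + 1):
--         mark = len(row)
--         row.extend([SYMBOL_X] * gap)
--         row.extend([SYMBOL_FILLED] * nums[k])
--         _place(nums, n, space_left, k + 1, used + gap, row, rows)
--         del row[mark:]
--
-- def generate_possible_rows(nums, size):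
--     rows = []
--     _place(nums, len(nums), size - sum(nums), 0, 0, [], rows)
--     return rows
-- ===== Notes on version B (the rewrite author's own statement) =====
-- stated objective: alternative
-- what changed: A enumerates all gap compositions with a generic fixed-sum-digits backtracker and then, per composition, interleaves gaps with clues via slice assignment and expands with a symbol-toggling loop; B is a single recursion over the clue blocks that builds each row directly, appending the gap and clue runs as it goes and emitting the row at the final gap.
import Mathlib
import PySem

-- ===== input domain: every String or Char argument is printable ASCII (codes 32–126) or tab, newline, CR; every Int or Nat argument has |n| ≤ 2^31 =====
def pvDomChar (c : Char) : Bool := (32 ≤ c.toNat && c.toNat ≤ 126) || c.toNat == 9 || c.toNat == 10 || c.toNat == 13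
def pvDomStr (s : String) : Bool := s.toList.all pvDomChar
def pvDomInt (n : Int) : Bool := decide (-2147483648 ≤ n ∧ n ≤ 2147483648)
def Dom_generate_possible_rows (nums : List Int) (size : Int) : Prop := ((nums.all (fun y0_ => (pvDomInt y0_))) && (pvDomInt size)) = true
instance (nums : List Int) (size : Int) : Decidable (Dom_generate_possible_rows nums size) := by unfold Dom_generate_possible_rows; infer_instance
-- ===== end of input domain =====

-- B replaces A's two-stage "enumerate gap compositions, then interleave+expand each" by one
-- recursion over the clue blocks that builds each row directly (objective: alternative).


-- ===== PORT A =====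
-- inner iter_fun of fixed_sum_digits; recursion on deepness (a Nat: the caller passes digits = len(nums)+1 ≥ 1);
-- 'ways.append' is threaded as the last accumulator argument
def pvIterFun (digits : Nat) (Total : Int) : Nat → Int → List Int → List (List Int) → List (List Int)
  | 0, sum, sequence, ways => if sum = Total then ways ++ [sequence] else ways
  | d + 1, sum, sequence, ways =>
      (PySem.List.pyRange (if d + 1 = 1 ∨ d + 1 = digits then 0 else 1) (Total - sum + 1) 1).foldl
        (fun ws i => pvIterFun digits Total d (sum + i) (sequence ++ [i]) ws) ways

def fixed_sum_digits (digits : Nat) (Tot : Int) : List (List Int) :=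
  pvIterFun digits Tot digits 0 [] []

-- row[::2] = combo; row[1::2] = nums — exact for len(combo) = len(nums) + 1, which fixed_sum_digits guarantees
def pvInterleave : List Int → List Int → List Int
  | [], _ => []
  | g :: _, [] => [g]
  | g :: gs, a :: as => g :: a :: pvInterleave gs as

-- 'for r in row: out.extend([curr]*r); curr = toggle' ([c]*r is empty for r < 0, hence .toNat)
def pvExpandLoop : List Int → List Int → Int → List Int
  | [], out, _ => out
  | r :: rs, out, curr =>
      pvExpandLoop rs (out ++ List.replicate r.toNat curr) (if curr = 2 then 1 else 2)

def generate_possible_rows (nums : List Int) (size : Int) : List (List Int) :=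
  let digits := nums.length + 1
  let space_left := size - nums.sum
  let combos := fixed_sum_digits digits space_left
  combos.foldl (fun rows combo => rows ++ [pvExpandLoop (pvInterleave combo nums) [] 1]) []

-- ===== PORT B =====
-- '_place' of Source B, recursing on the remaining clue blocks (rest = nums[k:], so 'k == 0' is
-- 'rest.length = nums.length'); Source B's row buffer with extend/backtrack is ported as passing
-- the extended row into the recursive call; 'rows.append' is the last accumulator argument
def pvPlace (nums : List Int) (space_left : Int) : List Int → Int → List Int → List (List Int) → List (List Int)
  | [], used, row, rows =>
      let gap := space_left - used
      if 0 ≤ gap then rows ++ [row ++ List.replicate gap.toNat 1] else rows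
  | x :: xs, used, row, rows =>
      (PySem.List.pyRange (if (x :: xs).length = nums.length then 0 else 1) (space_left - used + 1) 1).foldl
        (fun acc gap => pvPlace nums space_left xs (used + gap)
            (row ++ List.replicate gap.toNat 1 ++ List.replicate x.toNat 2) acc) rows

def generate_possible_rows_alt (nums : List Int) (size : Int) : List (List Int) :=
  pvPlace nums (size - nums.sum) nums 0 [] []

-- ===== PRECONDITION & SPEC =====
def Spec_generate_possible_rows (nums : List Int) (size : Int) (out : List (List Int)) : Prop := out = generate_possible_rows_alt nums size
instance (nums : List Int) (size : Int) (out : List (List Int)) : Decidable (Spec_generate_possible_rows nums size out) := by unfold Spec_generate_possible_rows; infer_instance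

-- ===== CLAIM (what is proved, stated in full; the proofs are below) =====
def Claim_equal_generate_possible_rows : Prop := ∀ (nums : List Int) (size : Int), Dom_generate_possible_rows nums size → Spec_generate_possible_rows nums size (generate_possible_rows nums size)

-- ===== LEMMAS AND PROOFS =====

-- the gap sequences pvIterFun appends after a given prefix, independent of that prefix
def pvTails (digits : Nat) (Total : Int) : Nat → Int → List (List Int)
  | 0, s => if s = Total then [[]] else []
  | d + 1, s =>
      (PySem.List.pyRange (if d + 1 = 1 ∨ d + 1 = digits then 0 else 1) (Total - s + 1) 1).flatMap
        (fun i => (pvTails digits Total d (s + i)).map (i :: ·))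

-- direct expansion of a gap sequence interleaved with the clue blocks
def pvExpandAll : List Int → List Int → List Int
  | [], _ => []
  | g :: _, [] => List.replicate g.toNat 1
  | g :: gs, a :: as => List.replicate g.toNat 1 ++ List.replicate a.toNat 2 ++ pvExpandAll gs as

theorem pvTails_zero (digits : Nat) (Total s : Int) :
    pvTails digits Total 0 s = if s = Total then [[]] else [] := rfl

theorem pvTails_succ (digits : Nat) (Total : Int) (d : Nat) (s : Int) :
    pvTails digits Total (d + 1) s
      = (PySem.List.pyRange (if d + 1 = 1 ∨ d + 1 = digits then 0 else 1) (Total - s + 1) 1).flatMap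
          (fun i => (pvTails digits Total d (s + i)).map (i :: ·)) := rfl

theorem pvIterFun_eq (digits : Nat) (Total : Int) :
    ∀ (d : Nat) (s : Int) (seq : List Int) (ways : List (List Int)),
      pvIterFun digits Total d s seq ways = ways ++ (pvTails digits Total d s).map (seq ++ ·) := by
  intro d
  induction d with
  | zero => intro s seq ways; simp only [pvIterFun, pvTails]; split <;> simp
  | succ d ih =>
      intro s seq ways
      simp only [pvIterFun, pvTails]
      rw [PySem.List.foldl_congr_mem _
            (fun ws i => pvIterFun digits Total d (s + i) (seq ++ [i]) ws)
            (fun ws i => ws ++ (pvTails digits Total d (s + i)).map ((seq ++ [i]) ++ ·)) ways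
            (fun acc i _ => ih (s + i) (seq ++ [i]) acc)]
      rw [PySem.List.foldl_append_eq_flatMap]
      simp [List.map_flatMap, List.map_map, Function.comp_def]

theorem pvTails_length (digits : Nat) (Total : Int) :
    ∀ (d : Nat) (s : Int) (t : List Int), t ∈ pvTails digits Total d s → t.length = d := by
  intro d
  induction d with
  | zero => intro s t ht; simp only [pvTails] at ht; split at ht <;> simp_all
  | succ d ih =>
      intro s t ht
      simp only [pvTails, List.mem_flatMap, List.mem_map] at ht
      obtain ⟨i, _, t', ht', rfl⟩ := ht
      simp [ih (s + i) t' ht']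

theorem pvExpand_eq :
    ∀ (ns c out : List Int), c.length = ns.length + 1 →
      pvExpandLoop (pvInterleave c ns) out 1 = out ++ pvExpandAll c ns := by
  intro ns
  induction ns with
  | nil =>
      intro c out h
      cases c with
      | nil => simp at h
      | cons g gs =>
          cases gs with
          | nil => simp [pvInterleave, pvExpandLoop, pvExpandAll]
          | cons _ _ => simp at h
  | cons a as ih =>
      intro c out h
      cases c with
      | nil => simp at h
      | cons g gs =>
          have hl : gs.length = as.length + 1 := by simpa using h
          simp only [pvInterleave, pvExpandLoop, pvExpandAll]
          norm_num
          rw [ih gs _ hl]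
          simp [List.append_assoc]

-- the range-scan at deepness 1 keeps exactly the single gap that completes the sum
theorem pvRangePick (k : Int) :
    ∀ (n : Nat) (a : Int), (k + 1 - a).toNat = n →
      (PySem.List.pyRange a (k + 1) 1).flatMap
          (fun i => if i = k then [[i]] else ([] : List (List Int)))
        = if a ≤ k then [[k]] else [] := by
  intro n
  induction n with
  | zero =>
      intro a h
      rw [PySem.List.pyRange_one_eq_nil (by omega), if_neg (by omega)]
      simp
  | succ n ih =>
      intro a h
      rw [PySem.List.pyRange_one_cons (by omega), if_pos (by omega)]
      simp only [List.flatMap_cons]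
      by_cases hak : a = k
      · subst hak
        rw [if_pos rfl, PySem.List.pyRange_one_eq_nil (by omega)]
        simp
      · rw [if_neg hak, ih (a + 1) (by omega), if_pos (by omega)]
        simp

theorem pvPlace_acc (nums : List Int) (sl : Int) :
    ∀ (rest : List Int) (used : Int) (row : List Int) (rows : List (List Int)),
      pvPlace nums sl rest used row rows = rows ++ pvPlace nums sl rest used row [] := by
  intro rest
  induction rest with
  | nil => intro used row rows; simp only [pvPlace]; split <;> simp
  | cons x xs ih =>
      intro used row rows
      have e : ∀ (rows : List (List Int)),
          pvPlace nums sl (x :: xs) used row rows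
            = rows ++ (PySem.List.pyRange (if (x :: xs).length = nums.length then 0 else 1) (sl - used + 1) 1).flatMap
                (fun gap => pvPlace nums sl xs (used + gap)
                  (row ++ List.replicate gap.toNat 1 ++ List.replicate x.toNat 2) []) := by
        intro rows
        simp only [pvPlace]
        rw [PySem.List.foldl_congr_mem _
              (fun acc gap => pvPlace nums sl xs (used + gap)
                (row ++ List.replicate gap.toNat 1 ++ List.replicate x.toNat 2) acc)
              (fun acc gap => acc ++ pvPlace nums sl xs (used + gap)
                (row ++ List.replicate gap.toNat 1 ++ List.replicate x.toNat 2) []) rows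
              (fun acc gap _ => ih (used + gap) _ acc)]
        exact PySem.List.foldl_append_eq_flatMap _ _ _
      rw [e rows, e []]
      simp

theorem pvPlace_cons_eq (nums : List Int) (sl x : Int) (xs : List Int) (used : Int)
    (row : List Int) :
    pvPlace nums sl (x :: xs) used row []
      = (PySem.List.pyRange (if (x :: xs).length = nums.length then 0 else 1) (sl - used + 1) 1).flatMap
          (fun gap => pvPlace nums sl xs (used + gap)
            (row ++ List.replicate gap.toNat 1 ++ List.replicate x.toNat 2) []) := by
  simp only [pvPlace]
  rw [PySem.List.foldl_congr_mem _
        (fun acc gap => pvPlace nums sl xs (used + gap)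
          (row ++ List.replicate gap.toNat 1 ++ List.replicate x.toNat 2) acc)
        (fun acc gap => acc ++ pvPlace nums sl xs (used + gap)
          (row ++ List.replicate gap.toNat 1 ++ List.replicate x.toNat 2) []) []
        (fun acc gap _ => pvPlace_acc nums sl xs (used + gap) _ acc)]
  rw [PySem.List.foldl_append_eq_flatMap]
  simp

theorem pvMain (nums : List Int) (Total : Int) :
    ∀ (rest : List Int) (s : Int) (row : List Int),
      (pvTails (nums.length + 1) Total (rest.length + 1) s).map (fun t => row ++ pvExpandAll t rest)
        = pvPlace nums Total rest s row [] := by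
  intro rest
  induction rest with
  | nil =>
      intro s row
      rw [List.length_nil, pvTails_succ, if_pos (Or.inl rfl)]
      have hf : (fun i => (pvTails (nums.length + 1) Total 0 (s + i)).map (i :: ·))
          = (fun i => if i = Total - s then [[i]] else ([] : List (List Int))) := by
        funext i
        rw [pvTails_zero]
        by_cases h : s + i = Total
        · rw [if_pos h, if_pos (by omega)]; simp
        · rw [if_neg h, if_neg (by omega)]; simp
      rw [hf, show Total - s + 1 = (Total - s) + 1 from by ring,
          pvRangePick (Total - s) (Total - s + 1 - 0).toNat 0 rfl]
      simp only [pvPlace]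
      by_cases h : (0 : Int) ≤ Total - s
      · rw [if_pos h, if_pos h]; simp [pvExpandAll]
      · rw [if_neg h, if_neg h]; simp
  | cons x xs ih =>
      intro s row
      rw [List.length_cons, pvTails_succ]
      have hlo : (if xs.length + 1 + 1 = 1 ∨ xs.length + 1 + 1 = nums.length + 1 then (0 : Int) else 1)
          = if (x :: xs).length = nums.length then 0 else 1 := by
        simp only [List.length_cons]
        by_cases h : xs.length + 1 = nums.length
        · rw [if_pos (Or.inr (by omega)), if_pos h]
        · rw [if_neg (by omega), if_neg h]
      rw [hlo, pvPlace_cons_eq]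
      simp only [List.map_flatMap, List.map_map]
      have hstep : (fun i => (pvTails (nums.length + 1) Total (xs.length + 1) (s + i)).map
            ((fun t => row ++ pvExpandAll t (x :: xs)) ∘ (i :: ·)))
          = (fun gap => pvPlace nums Total xs (s + gap)
              (row ++ List.replicate gap.toNat 1 ++ List.replicate x.toNat 2) []) := by
        funext i
        rw [← ih (s + i) (row ++ List.replicate i.toNat 1 ++ List.replicate x.toNat 2)]
        apply List.map_congr_left
        intro t _
        simp [pvExpandAll, List.append_assoc]
      rw [hstep]

theorem genA_char (nums : List Int) (size : Int) :
    generate_possible_rows nums size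
      = (pvTails (nums.length + 1) (size - nums.sum) (nums.length + 1) 0).map
          (fun c => pvExpandAll c nums) := by
  simp only [generate_possible_rows, fixed_sum_digits]
  rw [pvIterFun_eq, PySem.List.foldl_append_singleton_eq_map]
  simp only [List.nil_append, List.map_map]
  apply List.map_congr_left
  intro c hc
  have hlen : c.length = nums.length + 1 :=
    pvTails_length (nums.length + 1) (size - nums.sum) (nums.length + 1) 0 c hc
  simpa using pvExpand_eq nums c [] hlen

-- ===== VERDICT (by name: the statement is the Claim_ definition above) =====
theorem generate_possible_rows_spec : Claim_equal_generate_possible_rows := by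
  unfold Claim_equal_generate_possible_rows
  intro nums size _
  unfold Spec_generate_possible_rows generate_possible_rows_alt
  rw [genA_char, ← pvMain nums (size - nums.sum) nums 0 []]
  apply List.map_congr_left
  intro c _
  simp
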